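-- pv_equiv track=rewrite | github.com/glovguy/advent_of_code | 2018/day1.py | repeated_frequency
-- ===== SOURCE A (Python) =====
-- def repeated_frequency(freqChanges):
--     currentFreq = 0
--     seenFreqs = set([currentFreq])
--     while True:
--         for c in freqChanges:
--             currentFreq += int(c)
--             if currentFreq in seenFreqs: return currentFreq
--             seenFreqs.update([currentFreq])
-- ===== SOURCE B (Python) =====
-- def repeated_frequency(freqChanges):
--     # Arithmetic (non-simulating) solution: with prefix sums p_0..p_n and cycle
--     # total T, the frequency reached at cycle d, position j is p_j + d*T; it
--     # collides with an earlier one iff some p_i - p_j is a suitable multiple of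
--     # T.  Return the collision that is earliest in (cycle, position) order.
--     p = [0]
--     for c in freqChanges:
--         p.append(p[-1] + int(c))
--     n = len(freqChanges)
--     T = p[n]
--     best = None  # (cycle d, position j) of the earliest collision
--     for j in range(1, n + 1):
--         for i in range(0, n):
--             if T != 0:
--                 diff = p[i] - p[j]
--                 if diff % T == 0:
--                     d = diff // T
--                     if d >= 1 or (d == 0 and i < j):
--                         if best is None or (d, j) < best:
--                             best = (d, j)
--             else:
--                 if p[i] == p[j]:
--                     d = 0 if i < j else 1
--                     if best is None or (d, j) < best:
--                         best = (d, j)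
--     if best is None:
--         raise ValueError("frequency never repeats")
--     d, j = best
--     return p[j] + d * T
-- ===== Notes on version B (the rewrite author's own statement) =====
-- stated objective: alternative
-- what changed: B does not simulate the cycling at all: it builds the prefix sums once, computes for every index pair (i,j) the cycle count at which the frequency at position j would collide with the earlier prefix i (a divisibility test on their difference modulo the cycle total), and returns the collision that is earliest in (cycle, position) order; A replays the change list cycle by cycle with a growing seen-set. (B's cost is bounded by the input size alone, while A's depends on the number of cycles until the first repeat)
import Mathlib
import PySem

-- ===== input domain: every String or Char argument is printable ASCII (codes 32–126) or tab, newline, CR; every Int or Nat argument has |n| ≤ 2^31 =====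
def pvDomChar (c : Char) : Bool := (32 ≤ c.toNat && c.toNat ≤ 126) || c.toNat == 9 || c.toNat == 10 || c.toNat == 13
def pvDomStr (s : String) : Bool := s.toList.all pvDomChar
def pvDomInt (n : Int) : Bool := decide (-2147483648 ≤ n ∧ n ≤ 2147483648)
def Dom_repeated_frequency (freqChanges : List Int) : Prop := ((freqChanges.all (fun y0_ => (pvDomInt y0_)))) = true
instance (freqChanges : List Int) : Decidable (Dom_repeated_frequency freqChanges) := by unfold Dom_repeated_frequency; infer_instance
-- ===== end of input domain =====

-- B replaces A's cycle-by-cycle simulation by a closed-form pair analysis of the prefix sums;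
-- A's unbounded `while True` is ported with a fuel guard that Pre_ proves sufficient.


-- B replaces A's cycle-by-cycle simulation by a closed-form pair analysis of the prefix sums;
-- A's unbounded `while True` is ported with a fuel guard that Pre_ proves sufficient.

-- ===== PORT A =====
def pvForA (seen : PySem.Set Int) (cur : Int) : List Int → Sum Int (PySem.Set Int × Int)
  | [] => Sum.inr (seen, cur)
  | c :: rest =>
    let cur' := cur + c
    if PySem.Set.contains seen cur' then Sum.inl cur'
    else pvForA (PySem.Set.update seen [cur']) cur' rest

def pvWhileA (xs : List Int) : Nat → PySem.Set Int → Int → Int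
  | 0, _, _ => 0
  | Nat.succ f, seen, cur =>
    match pvForA seen cur xs with
    | Sum.inl r => r
    | Sum.inr (s, c) => pvWhileA xs f s c

def repeated_frequency (freqChanges : List Int) : Int :=
  pvWhileA freqChanges (2 + 2 * (freqChanges.map Int.natAbs).sum)
    (PySem.Set.ofList [0]) 0

-- ===== PORT B =====
def pvPrefixes (xs : List Int) : List Int :=
  xs.foldl (fun p c => p ++ [PySem.List.pyGetD p (-1) 0 + c]) [0]

def pvLexLt (a b : Int × Int) : Bool := a.1 < b.1 || (a.1 == b.1 && a.2 < b.2)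

def pvUpd (best : Option (Int × Int)) (c : Int × Int) : Option (Int × Int) :=
  match best with
  | none => some c
  | some b => if pvLexLt c b then some c else some b

def pvBody (p : List Int) (T j : Int) (best : Option (Int × Int)) (i : Int) : Option (Int × Int) :=
  if T ≠ 0 then
    let diff := PySem.List.pyGetD p i 0 - PySem.List.pyGetD p j 0
    if PySem.Int.mod diff T = 0 then
      let d := PySem.Int.floordiv diff T
      if 1 ≤ d ∨ (d = 0 ∧ i < j) then pvUpd best (d, j) else best
    else best
  else
    if PySem.List.pyGetD p i 0 = PySem.List.pyGetD p j 0 then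
      pvUpd best (if i < j then (0, j) else (1, j))
    else best

def repeated_frequency_alt (freqChanges : List Int) : Int :=
  let p := pvPrefixes freqChanges
  let n : Int := PySem.List.len freqChanges
  let T := PySem.List.pyGetD p n 0
  let best := (PySem.List.pyRange 1 (n + 1) 1).foldl
      (fun b j => (PySem.List.pyRange 0 n 1).foldl (fun b i => pvBody p T j b i) b) none
  match best with
  | none => 0   -- Source B raises ValueError here (the frequency never repeats); outside Pre_
  | some (d, j) => PySem.List.pyGetD p j 0 + d * T

-- ===== PRECONDITION & SPEC =====
-- Pre_ is exactly the condition under which A's `while True` terminates: some prefix sum is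
-- repeated on the first pass, or (with a nonzero cycle total) some pair of prefix sums
-- differs by a positive multiple of the cycle total.  Outside it A loops forever (returns
-- nothing) and Source B raises ValueError.
def Pre_repeated_frequency (freqChanges : List Int) : Prop :=
  ∃ j ∈ Finset.Icc 1 freqChanges.length, ∃ i ∈ Finset.range freqChanges.length,
    (((freqChanges.take i).sum = (freqChanges.take j).sum ∧ (i < j ∨ freqChanges.sum = 0)) ∨
     (freqChanges.sum ≠ 0 ∧ freqChanges.sum ∣ ((freqChanges.take i).sum - (freqChanges.take j).sum) ∧
      1 ≤ ((freqChanges.take i).sum - (freqChanges.take j).sum) / freqChanges.sum))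
instance (freqChanges : List Int) : Decidable (Pre_repeated_frequency freqChanges) := by
  unfold Pre_repeated_frequency; infer_instance

def pvWitness_repeated_frequency : List Int := [1, -1]

def Spec_repeated_frequency (freqChanges : List Int) (out : Int) : Prop := out = repeated_frequency_alt freqChanges
instance (freqChanges : List Int) (out : Int) : Decidable (Spec_repeated_frequency freqChanges out) := by unfold Spec_repeated_frequency; infer_instance

-- ===== CLAIM (what is proved, stated in full; the proofs are below) =====
def Claim_equal_repeated_frequency : Prop := ∀ (freqChanges : List Int), Dom_repeated_frequency freqChanges → Pre_repeated_frequency freqChanges → Spec_repeated_frequency freqChanges (repeated_frequency freqChanges)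

-- ===== LEMMAS AND PROOFS =====

def pfN (xs : List Int) (i : Nat) : Int := (xs.take i).sum
def vSeq (xs : List Int) (t : Nat) : Int := ((t / xs.length : Nat) : Int) * xs.sum + pfN xs (t % xs.length)

theorem pfN_succ (xs : List Int) (i : Nat) (h : i < xs.length) :
    pfN xs (i + 1) = pfN xs i + xs.getD i 0 := by
  rw [pfN, pfN, List.take_add_one, List.getElem?_eq_getElem h, List.getD_eq_getElem _ _ h,
    Option.toList_some, List.sum_append, List.sum_cons, List.sum_nil, add_zero]

theorem pfN_len (xs : List Int) : pfN xs xs.length = xs.sum := by simp [pfN]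

theorem vSeq_zero (xs : List Int) : vSeq xs 0 = 0 := by simp [vSeq, pfN]

theorem divmod_char (n t q r : Nat) (h0 : 0 < n) (hr : r < n) (he : t = q * n + r) :
    t / n = q ∧ t % n = r := by
  have := (Nat.div_mod_unique (b := n) (a := t) (d := q) (c := r) h0).mpr
    ⟨by rw [he, Nat.mul_comm n q]; omega, hr⟩
  exact ⟨this.1, this.2⟩

theorem vSeq_succ (xs : List Int) (hn : 1 ≤ xs.length) (t : Nat) :
    vSeq xs (t + 1) = vSeq xs t + xs.getD (t % xs.length) 0 := by
  have h0 : 0 < xs.length := hn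
  have hr : t % xs.length < xs.length := Nat.mod_lt _ h0
  have hdm : xs.length * (t / xs.length) + t % xs.length = t := Nat.div_add_mod t xs.length
  by_cases hcase : t % xs.length + 1 < xs.length
  · obtain ⟨hd, hm⟩ := divmod_char xs.length (t+1) (t / xs.length) (t % xs.length + 1) h0 hcase
      (by rw [Nat.mul_comm (t / xs.length) xs.length]; omega)
    rw [vSeq, vSeq, hd, hm, pfN_succ xs _ hr]; ring
  · have heq : t % xs.length + 1 = xs.length := by omega
    obtain ⟨hd, hm⟩ := divmod_char xs.length (t+1) (t / xs.length + 1) 0 h0 h0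
      (by rw [Nat.mul_comm (t / xs.length + 1) xs.length, Nat.mul_add]; omega)
    have hp : pfN xs (t % xs.length) + xs.getD (t % xs.length) 0 = xs.sum := by
      rw [← pfN_succ xs _ hr, heq, pfN_len]
    rw [vSeq, vSeq, hd, hm]
    simp only [pfN, List.take_zero, List.sum_nil, add_zero]
    rw [Nat.cast_add, Nat.cast_one]
    unfold pfN at hp
    linarith [hp]

theorem vSeq_decomp0 (xs : List Int) (m i : Nat) (hi : i < xs.length) :
    vSeq xs (m * xs.length + i) = (m : Int) * xs.sum + pfN xs i := by
  obtain ⟨hd, hm⟩ := divmod_char xs.length (m * xs.length + i) m i (by omega) hi rfl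
  rw [vSeq, hd, hm]

theorem vSeq_decomp (xs : List Int) (d j : Nat) (h1 : 1 ≤ j) (hj : j ≤ xs.length) :
    vSeq xs (d * xs.length + j) = (d : Int) * xs.sum + pfN xs j := by
  by_cases h : j < xs.length
  · exact vSeq_decomp0 xs d j h
  · have hj' : j = xs.length := by omega
    have he : d * xs.length + j = (d+1) * xs.length + 0 := by rw [Nat.add_mul]; omega
    rw [he, vSeq_decomp0 xs (d+1) 0 (by omega), hj', pfN_len]
    simp only [pfN, List.take_zero, List.sum_nil]
    push_cast; ring

theorem natAbs_sum_le (l : List Int) : l.sum.natAbs ≤ (l.map Int.natAbs).sum := by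
  induction l with
  | nil => simp
  | cons x xs ih =>
    simp only [List.sum_cons, List.map_cons]
    calc (x + xs.sum).natAbs ≤ x.natAbs + xs.sum.natAbs := Int.natAbs_add_le _ _
    _ ≤ x.natAbs + (xs.map Int.natAbs).sum := by omega

theorem pf_bound (xs : List Int) (m : Nat) :
    (pfN xs m).natAbs ≤ (xs.map Int.natAbs).sum := by
  calc (pfN xs m).natAbs ≤ ((xs.take m).map Int.natAbs).sum := natAbs_sum_le _
  _ ≤ (xs.map Int.natAbs).sum := by
      rw [List.map_take]
      conv_rhs => rw [← List.take_append_drop m (xs.map Int.natAbs)]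
      rw [List.sum_append]; omega

def Coll (xs : List Int) (t : Nat) : Prop := ∃ s < t, vSeq xs s = vSeq xs t

def InS (xs : List Int) (d j : Int) : Prop :=
  1 ≤ j ∧ j ≤ xs.length ∧ ∃ i : Int, 0 ≤ i ∧ i < xs.length ∧
    pfN xs i.toNat - pfN xs j.toNat = d * xs.sum ∧ (1 ≤ d ∨ (d = 0 ∧ i < j))

theorem collAt (xs : List Int) (d j : Int) (h : InS xs d j) :
    Coll xs (d.toNat * xs.length + j.toNat) := by
  obtain ⟨hj1, hjn, i, hi0, hin, heq, hcond⟩ := h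
  have hd0 : 0 ≤ d := by rcases hcond with h | h <;> omega
  have hjn1 : 1 ≤ j.toNat := by omega
  have hjnn : j.toNat ≤ xs.length := by omega
  have hinn : i.toNat < xs.length := by omega
  have hvt : vSeq xs (d.toNat * xs.length + j.toNat) = (d.toNat : Int) * xs.sum + pfN xs j.toNat :=
    vSeq_decomp xs d.toNat j.toNat hjn1 hjnn
  have hvs : vSeq xs i.toNat = pfN xs i.toNat := by
    have := vSeq_decomp0 xs 0 i.toNat hinn
    simpa using this
  refine ⟨i.toNat, ?_, ?_⟩
  · rcases hcond with h1 | ⟨h1, h2⟩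
    · have : 1 ≤ d.toNat := by omega
      have := hjn1
      calc i.toNat < xs.length := hinn
      _ ≤ d.toNat * xs.length + j.toNat := by nlinarith
    · omega
  · rw [hvs, hvt]
    have hcast : (d.toNat : Int) = d := Int.toNat_of_nonneg hd0
    rw [hcast]; linarith

theorem collDecomp (xs : List Int) (t : Nat) (ht : 1 ≤ t) (hn : 1 ≤ xs.length)
    (hc : Coll xs t) :
    ∃ (d'' : Int) (dt jt : Nat), t = dt * xs.length + jt ∧ 1 ≤ jt ∧ jt ≤ xs.length ∧
      InS xs d'' (jt : Int) ∧ d'' ≤ (dt : Int) := by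
  obtain ⟨s, hst, hveq⟩ := hc
  set n := xs.length with hnn
  have h0 : 0 < n := hn
  obtain ⟨dt, hdt⟩ : ∃ dt, (t-1) / n = dt := ⟨_, rfl⟩
  obtain ⟨rt, hrt⟩ : ∃ rt, (t-1) % n = rt := ⟨_, rfl⟩
  have hrtn : rt < n := hrt ▸ Nat.mod_lt _ h0
  obtain ⟨jt, hjt⟩ : ∃ jt, rt + 1 = jt := ⟨_, rfl⟩
  have hmod : n * dt + rt = t - 1 := by rw [← hdt, ← hrt]; exact Nat.div_add_mod (t-1) n
  have hteq : t = dt * n + jt := by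
    have h1 : dt * n = n * dt := Nat.mul_comm _ _
    omega
  have hjt1 : 1 ≤ jt := by omega
  have hjtn : jt ≤ n := by omega
  obtain ⟨m, hm⟩ : ∃ m, s / n = m := ⟨_, rfl⟩
  obtain ⟨iN, hiN⟩ : ∃ iN, s % n = iN := ⟨_, rfl⟩
  have hin : iN < n := hiN ▸ Nat.mod_lt _ h0
  have hseq : s = m * n + iN := by
    have h1 := Nat.div_add_mod s n
    have h2 : m * n = n * m := Nat.mul_comm _ _
    rw [hm, hiN] at h1
    omega
  have hvs : vSeq xs s = (m : Int) * xs.sum + pfN xs iN := by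
    rw [hseq]; exact vSeq_decomp0 xs m iN hin
  have hvt : vSeq xs t = (dt : Int) * xs.sum + pfN xs jt := by
    rw [hteq]; exact vSeq_decomp xs dt jt hjt1 hjtn
  have hmdt : m < dt ∨ (m = dt ∧ iN < jt) := by
    by_cases hcase : dt + 1 ≤ m
    · exfalso
      have h1 : (dt + 1) * n ≤ m * n := Nat.mul_le_mul_right n hcase
      have h2 : (dt + 1) * n = dt * n + n := by rw [Nat.add_mul]; omega
      omega
    · by_cases hcase2 : m = dt
      · right; refine ⟨hcase2, ?_⟩; rw [hcase2] at hseq; omega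
      · left; omega
  refine ⟨(dt : Int) - m, dt, jt, hteq, hjt1, hjtn, ⟨by omega, by omega, (iN : Int), by omega, by omega, ?_, ?_⟩, by omega⟩
  · have : (m : Int) * xs.sum + pfN xs iN = (dt : Int) * xs.sum + pfN xs jt := by
      rw [← hvs, ← hvt]; exact hveq
    have h1 : (iN : Int).toNat = iN := by omega
    have h2 : ((jt : Int)).toNat = jt := by omega
    rw [h1, h2]; linarith [this]
    
  · rcases hmdt with h | ⟨h1, h2⟩
    · left; omega
    · right; constructor <;> omega

theorem drop_head (xs ys : List Int) (c : Int) (r : Nat) (h : xs.drop r = c :: ys) :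
    xs.getD r 0 = c ∧ xs.drop (r+1) = ys ∧ r < xs.length := by
  have hr : r < xs.length := by
    by_contra hle
    rw [List.drop_eq_nil_iff.mpr (by omega)] at h
    exact absurd h (by simp)
  refine ⟨?_, ?_, hr⟩
  · have h0 : xs[r]? = some c := by
      have h2 : (xs.drop r)[0]? = xs[r + 0]? := List.getElem?_drop
      rw [h] at h2
      simpa using h2.symm
    simp [List.getD, h0]
  · rw [← List.drop_drop, h]
    rfl

theorem vstep (xs : List Int) (hn : 1 ≤ xs.length) (k r : Nat) (hr : r < xs.length) :
    vSeq xs (k * xs.length + r + 1) = vSeq xs (k * xs.length + r) + xs.getD r 0 := by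
  obtain ⟨hd, hm⟩ := divmod_char xs.length (k * xs.length + r) k r hn hr rfl
  rw [vSeq_succ xs hn, hm]

theorem pvForA_found (xs : List Int) (hn : 1 ≤ xs.length) :
    ∀ (ys : List Int) (r k : Nat) (seen : PySem.Set Int) (t0 : Nat),
    ys = xs.drop r → r ≤ xs.length →
    (∀ x : Int, x ∈ seen ↔ ∃ s ≤ k * xs.length + r, vSeq xs s = x) →
    k * xs.length + r < t0 → t0 ≤ k * xs.length + xs.length → Coll xs t0 →
    (∀ u, k * xs.length + r < u → u < t0 → ¬ Coll xs u) →
    pvForA seen (vSeq xs (k * xs.length + r)) ys = Sum.inl (vSeq xs t0) := by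
  intro ys
  induction ys with
  | nil =>
    intro r k seen t0 hdrop hrn hinv hlt hle hcoll hmin
    exfalso
    have : xs.length ≤ r := by
      by_contra hc
      have : xs.drop r ≠ [] := by
        simp [List.drop_eq_nil_iff]; omega
      exact this hdrop.symm
    omega
  | cons c rest ih =>
    intro r k seen t0 hdrop hrn hinv hlt hle hcoll hmin
    obtain ⟨hc, hrest, hr⟩ := drop_head xs rest c r hdrop.symm
    have hv1 : vSeq xs (k * xs.length + r) + c = vSeq xs (k * xs.length + r + 1) := by
      rw [vstep xs hn k r hr, hc]
    have hmem : PySem.Set.contains seen (vSeq xs (k * xs.length + r + 1)) = true ↔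
        Coll xs (k * xs.length + r + 1) := by
      rw [PySem.Set.contains_iff, hinv]
      constructor
      · rintro ⟨s, hs, heq⟩; exact ⟨s, by omega, heq⟩
      · rintro ⟨s, hs, heq⟩; exact ⟨s, by omega, heq⟩
    by_cases hcase : t0 = k * xs.length + r + 1
    · have hcol1 : Coll xs (k * xs.length + r + 1) := hcase ▸ hcoll
      rw [pvForA]
      simp only [hv1, hmem.mpr hcol1, if_true, hcase]
    · have hnc : ¬ Coll xs (k * xs.length + r + 1) :=
        hmin _ (by omega) (by omega)
      have hcontains : PySem.Set.contains seen (vSeq xs (k * xs.length + r + 1)) = false := by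
        rw [← Bool.not_eq_true, hmem]; exact hnc
      rw [pvForA]
      simp only [hv1, hcontains, Bool.false_eq_true, if_false]
      rw [PySem.Set.update_cons, PySem.Set.update_nil]
      have hinv' : ∀ x : Int, x ∈ PySem.Set.add seen (vSeq xs (k * xs.length + r + 1)) ↔
          ∃ s ≤ k * xs.length + (r + 1), vSeq xs s = x := by
        intro x
        rw [PySem.Set.mem_add, hinv]
        constructor
        · rintro (⟨s, hs, heq⟩ | heq)
          · exact ⟨s, by omega, heq⟩
          · exact ⟨k * xs.length + r + 1, by omega, heq.symm⟩
        · rintro ⟨s, hs, heq⟩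
          by_cases hs' : s = k * xs.length + r + 1
          · right; rw [← heq, hs']
          · left; exact ⟨s, by omega, heq⟩
      have := ih (r + 1) k (PySem.Set.add seen (vSeq xs (k * xs.length + r + 1))) t0
        hrest.symm (by omega) hinv' (by omega) hle hcoll
        (fun u hu1 hu2 => hmin u (by omega) hu2)
      rw [← Nat.add_assoc] at this
      exact this

theorem pvForA_none (xs : List Int) (hn : 1 ≤ xs.length) :
    ∀ (ys : List Int) (r k : Nat) (seen : PySem.Set Int),
    ys = xs.drop r → r ≤ xs.length →
    (∀ x : Int, x ∈ seen ↔ ∃ s ≤ k * xs.length + r, vSeq xs s = x) →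
    (∀ u, k * xs.length + r < u → u ≤ k * xs.length + xs.length → ¬ Coll xs u) →
    ∃ seen', pvForA seen (vSeq xs (k * xs.length + r)) ys
        = Sum.inr (seen', vSeq xs (k * xs.length + xs.length)) ∧
      (∀ x : Int, x ∈ seen' ↔ ∃ s ≤ (k+1) * xs.length, vSeq xs s = x) := by
  intro ys
  induction ys with
  | nil =>
    intro r k seen hdrop hrn hinv hnone
    have hrlen : xs.length ≤ r := by
      by_contra hc
      have hne : xs.drop r ≠ [] := by simp [List.drop_eq_nil_iff]; omega
      exact hne hdrop.symm
    have hreq : r = xs.length := by omega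
    refine ⟨seen, ?_, ?_⟩
    · rw [pvForA, hreq]
    · intro x
      rw [hinv x, hreq]
      have : (k+1) * xs.length = k * xs.length + xs.length := by rw [Nat.add_mul]; omega
      rw [this]
  | cons c rest ih =>
    intro r k seen hdrop hrn hinv hnone
    obtain ⟨hc, hrest, hr⟩ := drop_head xs rest c r hdrop.symm
    have hv1 : vSeq xs (k * xs.length + r) + c = vSeq xs (k * xs.length + r + 1) := by
      rw [vstep xs hn k r hr, hc]
    have hnc : ¬ Coll xs (k * xs.length + r + 1) :=
      hnone _ (by omega) (by omega)
    have hcontains : PySem.Set.contains seen (vSeq xs (k * xs.length + r + 1)) = false := by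
      rw [← Bool.not_eq_true, PySem.Set.contains_iff, hinv]
      intro ⟨s, hs, heq⟩
      exact hnc ⟨s, by omega, heq⟩
    rw [pvForA]
    simp only [hv1, hcontains, Bool.false_eq_true, if_false]
    rw [PySem.Set.update_cons, PySem.Set.update_nil]
    have hinv' : ∀ x : Int, x ∈ PySem.Set.add seen (vSeq xs (k * xs.length + r + 1)) ↔
        ∃ s ≤ k * xs.length + (r + 1), vSeq xs s = x := by
      intro x
      rw [PySem.Set.mem_add, hinv]
      constructor
      · rintro (⟨s, hs, heq⟩ | heq)
        · exact ⟨s, by omega, heq⟩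
        · exact ⟨k * xs.length + r + 1, by omega, heq.symm⟩
      · rintro ⟨s, hs, heq⟩
        by_cases hs' : s = k * xs.length + r + 1
        · right; rw [← heq, hs']
        · left; exact ⟨s, by omega, heq⟩
    have := ih (r + 1) k (PySem.Set.add seen (vSeq xs (k * xs.length + r + 1)))
      hrest.symm (by omega) hinv' (fun u hu1 hu2 => hnone u (by omega) hu2)
    rw [← Nat.add_assoc] at this
    exact this

theorem pvWhileA_spec (xs : List Int) (hn : 1 ≤ xs.length) :
    ∀ (f k : Nat) (seen : PySem.Set Int) (t0 : Nat),
    (∀ x : Int, x ∈ seen ↔ ∃ s ≤ k * xs.length, vSeq xs s = x) →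
    k * xs.length < t0 → Coll xs t0 →
    (∀ u, k * xs.length < u → u < t0 → ¬ Coll xs u) →
    t0 ≤ k * xs.length + f * xs.length →
    pvWhileA xs f seen (vSeq xs (k * xs.length)) = vSeq xs t0 := by
  intro f
  induction f with
  | zero =>
    intro k seen t0 hinv hlt hcoll hmin hle
    exfalso; omega
  | succ f ih =>
    intro k seen t0 hinv hlt hcoll hmin hle
    have hinv0 : ∀ x : Int, x ∈ seen ↔ ∃ s ≤ k * xs.length + 0, vSeq xs s = x := by
      simpa using hinv
    by_cases hwin : t0 ≤ k * xs.length + xs.length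
    · have hfound := pvForA_found xs hn xs 0 k seen t0 (by simp) (by omega) hinv0
        (by omega) hwin hcoll (fun u hu1 hu2 => hmin u (by omega) hu2)
      rw [pvWhileA]
      rw [show k * xs.length + 0 = k * xs.length by omega] at hfound
      rw [hfound]
    · have hnone := pvForA_none xs hn xs 0 k seen (by simp) (by omega) hinv0
        (fun u hu1 hu2 => hmin u (by omega) (by omega))
      rw [show k * xs.length + 0 = k * xs.length by omega] at hnone
      obtain ⟨seen', heq, hinv'⟩ := hnone
      rw [pvWhileA, heq]
      have hkn : (k+1) * xs.length = k * xs.length + xs.length := by rw [Nat.add_mul]; omega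
      have := ih (k+1) seen' t0 (by rw [hkn] at hinv' ⊢; exact hinv')
        (by omega) hcoll (fun u hu1 hu2 => hmin u (by omega) hu2)
        (by have h2 : (f+1) * xs.length = f * xs.length + xs.length := by rw [Nat.add_mul]; omega
            omega)
      rw [hkn] at this
      exact this

theorem prefixes_fold (ys : List Int) :
    ∀ (acc : List Int) (h : acc ≠ []),
    ys.foldl (fun p c => p ++ [PySem.List.pyGetD p (-1) 0 + c]) acc
      = acc ++ (List.range ys.length).map (fun i => acc.getLast h + (ys.take (i+1)).sum) := by
  induction ys with
  | nil => intro acc h; simp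
  | cons c ys ih =>
    intro acc h
    rw [List.foldl_cons]
    have hlast : PySem.List.pyGetD acc (-1) 0 = acc.getLast h := PySem.List.pyGetD_neg_one (xs := acc) 0 h
    rw [hlast]
    have hne : acc ++ [acc.getLast h + c] ≠ [] := by simp
    rw [ih (acc ++ [acc.getLast h + c]) hne]
    have hlast2 : (acc ++ [acc.getLast h + c]).getLast hne = acc.getLast h + c := by
      simp
    rw [hlast2, List.length_cons, List.range_succ_eq_map, List.map_cons, List.map_map,
      List.append_assoc]
    congr 1
    rw [List.singleton_append]
    congr 1
    · simp
    · apply List.map_congr_left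
      intro i _
      simp [List.take_succ_cons, List.sum_cons]
      ring

theorem pvPrefixes_eq (xs : List Int) :
    pvPrefixes xs = (List.range (xs.length + 1)).map (fun i => pfN xs i) := by
  rw [pvPrefixes, prefixes_fold xs [0] (by simp)]
  rw [List.range_succ_eq_map, List.map_cons, List.map_map]
  rw [List.singleton_append]
  congr 1
  apply List.map_congr_left
  intro i _
  simp [pfN]

theorem pvPrefixes_getD (xs : List Int) (j : Nat) (hj : j ≤ xs.length) :
    (pvPrefixes xs).getD j 0 = pfN xs j := by
  rw [pvPrefixes_eq]
  have hlen : j < ((List.range (xs.length + 1)).map (fun i => pfN xs i)).length := by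
    simp; omega
  rw [List.getD_eq_getElem _ _ hlen]
  simp

theorem pvPrefixes_pyGetD (xs : List Int) (jI : Int) (h0 : 0 ≤ jI) (hj : jI ≤ xs.length) :
    PySem.List.pyGetD (pvPrefixes xs) jI 0 = pfN xs jI.toNat := by
  rw [PySem.List.pyGetD_of_nonneg]
  · exact pvPrefixes_getD xs jI.toNat (by omega)
  · exact h0

def pvLexLe (a b : Int × Int) : Prop := a.1 < b.1 ∨ (a.1 = b.1 ∧ a.2 ≤ b.2)

theorem pvLexLt_iff (a b : Int × Int) :
    pvLexLt a b = true ↔ (a.1 < b.1 ∨ (a.1 = b.1 ∧ a.2 < b.2)) := by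
  simp [pvLexLt]

theorem pvLexLe_trans (a b c : Int × Int) (h1 : pvLexLe a b) (h2 : pvLexLe b c) :
    pvLexLe a c := by
  unfold pvLexLe at *
  rcases h1 with h1 | ⟨h1, h1'⟩ <;> rcases h2 with h2 | ⟨h2, h2'⟩ <;>
    first
      | (left; omega)
      | (right; constructor <;> omega)

theorem pvLexLe_of_lt (a b : Int × Int) (h : pvLexLt a b = true) : pvLexLe a b := by
  rw [pvLexLt_iff] at h
  unfold pvLexLe
  rcases h with h | ⟨h, h'⟩
  · left; exact h
  · right; exact ⟨h, le_of_lt h'⟩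

theorem pvLexLe_of_not_lt (a b : Int × Int) (h : pvLexLt a b = false) : pvLexLe b a := by
  have := pvLexLt_iff a b
  rw [h] at this
  simp at this
  unfold pvLexLe
  by_cases hc : b.1 < a.1
  · left; exact hc
  · right
    have h1 := this.1
    have h2 := this.2
    constructor <;> omega

theorem pvLexLe_refl (a : Int × Int) : pvLexLe a a := by
  unfold pvLexLe; right; exact ⟨rfl, le_refl _⟩

theorem foldl_pvUpd_some (L : List (Int × Int)) :
    ∀ b0 : Int × Int, ∃ m, L.foldl pvUpd (some b0) = some m ∧ (m = b0 ∨ m ∈ L) ∧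
      pvLexLe m b0 ∧ ∀ c ∈ L, pvLexLe m c := by
  induction L with
  | nil => intro b0; exact ⟨b0, rfl, Or.inl rfl, pvLexLe_refl b0, by simp⟩
  | cons c L ih =>
    intro b0
    rw [List.foldl_cons]
    by_cases hlt : pvLexLt c b0 = true
    · have hupd : pvUpd (some b0) c = some c := by simp [pvUpd, hlt]
      rw [hupd]
      obtain ⟨m, heq, hmem, hle, hall⟩ := ih c
      refine ⟨m, heq, ?_, ?_, ?_⟩
      · rcases hmem with h | h
        · exact Or.inr (List.mem_cons.mpr (Or.inl h))
        · exact Or.inr (List.mem_cons.mpr (Or.inr h))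
      · exact pvLexLe_trans m c b0 hle (pvLexLe_of_lt c b0 hlt)
      · intro x hx
        rcases List.mem_cons.mp hx with h | h
        · rw [h]; exact hle
        · exact hall x h
    · have hupd : pvUpd (some b0) c = some b0 := by
        simp [pvUpd]
        intro hc
        exact absurd hc hlt
      rw [hupd]
      obtain ⟨m, heq, hmem, hle, hall⟩ := ih b0
      refine ⟨m, heq, ?_, hle, ?_⟩
      · rcases hmem with h | h
        · exact Or.inl h
        · exact Or.inr (List.mem_cons.mpr (Or.inr h))
      · intro x hx
        rcases List.mem_cons.mp hx with h | h
        · rw [h]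
          exact pvLexLe_trans m b0 c hle
            (pvLexLe_of_not_lt c b0 (Bool.not_eq_true _ |>.mp hlt))
        · exact hall x h

theorem foldl_pvUpd_none (L : List (Int × Int)) (h : L ≠ []) :
    ∃ m, L.foldl pvUpd none = some m ∧ m ∈ L ∧ ∀ c ∈ L, pvLexLe m c := by
  match L, h with
  | c :: L, _ =>
    rw [List.foldl_cons]
    have h0 : pvUpd none c = some c := rfl
    rw [h0]
    obtain ⟨m, heq, hmem, hle, hall⟩ := foldl_pvUpd_some L c
    refine ⟨m, heq, ?_, ?_⟩
    · rcases hmem with h | h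
      · exact List.mem_cons.mpr (Or.inl h)
      · exact List.mem_cons.mpr (Or.inr h)
    · intro x hx
      rcases List.mem_cons.mp hx with h | h
      · rw [h]; exact hle
      · exact hall x h

theorem foldl_match_filterMap (g : Int → Option (Int × Int)) :
    ∀ (l : List Int) (b : Option (Int × Int)),
    l.foldl (fun b i => match g i with | none => b | some c => pvUpd b c) b
      = (l.filterMap g).foldl pvUpd b := by
  intro l
  induction l with
  | nil => intro b; rfl
  | cons x l ih =>
    intro b
    rw [List.foldl_cons, List.filterMap_cons]
    cases hg : g x with
    | none => simp only; exact ih b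
    | some c => simp only [List.foldl_cons]; exact ih (pvUpd b c)

theorem foldl_flat (Lf : Int → List (Int × Int)) :
    ∀ (l : List Int) (b : Option (Int × Int)),
    l.foldl (fun b j => (Lf j).foldl pvUpd b) b = (l.flatMap Lf).foldl pvUpd b := by
  intro l
  induction l with
  | nil => intro b; rfl
  | cons x l ih =>
    intro b
    rw [List.foldl_cons, List.flatMap_cons, List.foldl_append]
    exact ih _

def candAt (xs : List Int) (j i : Int) : Option (Int × Int) :=
  if xs.sum ≠ 0 then
    if PySem.Int.mod (pfN xs i.toNat - pfN xs j.toNat) xs.sum = 0 then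
      if 1 ≤ PySem.Int.floordiv (pfN xs i.toNat - pfN xs j.toNat) xs.sum ∨
         (PySem.Int.floordiv (pfN xs i.toNat - pfN xs j.toNat) xs.sum = 0 ∧ i < j) then
        some (PySem.Int.floordiv (pfN xs i.toNat - pfN xs j.toNat) xs.sum, j)
      else none
    else none
  else
    if pfN xs i.toNat = pfN xs j.toNat then some (if i < j then ((0:Int), j) else (1, j))
    else none

def candList (xs : List Int) : List (Int × Int) :=
  (PySem.List.pyRange 1 ((xs.length : Int) + 1) 1).flatMap
    (fun j => (PySem.List.pyRange 0 (xs.length : Int) 1).filterMap (candAt xs j))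


theorem body_candAt (xs : List Int) (b : Option (Int × Int)) (i j : Int)
    (hi0 : 0 ≤ i) (hin : i < xs.length) (hj1 : 1 ≤ j) (hjn : j ≤ xs.length) :
    pvBody (pvPrefixes xs) xs.sum j b i
      = match candAt xs j i with | none => b | some c => pvUpd b c := by
  unfold pvBody candAt
  rw [pvPrefixes_pyGetD xs i hi0 (le_of_lt hin), pvPrefixes_pyGetD xs j (by omega) hjn]
  split_ifs <;> simp only [pvUpd] <;> split_ifs <;> rfl

theorem floordiv_exact (a T q : Int) (hT : T ≠ 0) (h : a = q * T) :
    PySem.Int.floordiv a T = q := by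
  have hmod : PySem.Int.mod a T = 0 := (PySem.Int.mod_eq_zero_iff_dvd a T).mpr ⟨q, by rw [h]; ring⟩
  have h2 := PySem.Int.floordiv_mul_add_mod a T
  rw [hmod, add_zero] at h2
  apply mul_right_cancel₀ hT
  rw [h2, h]

theorem candAt_sound (xs : List Int) (i j : Int) (hi0 : 0 ≤ i) (hin : i < xs.length)
    (hj1 : 1 ≤ j) (hjn : j ≤ xs.length) (c : Int × Int)
    (h : candAt xs j i = some c) : c.2 = j ∧ InS xs c.1 j := by
  unfold candAt at h
  by_cases hT : xs.sum ≠ 0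
  · rw [if_pos hT] at h
    by_cases hmod : PySem.Int.mod (pfN xs i.toNat - pfN xs j.toNat) xs.sum = 0
    · rw [if_pos hmod] at h
      set d := PySem.Int.floordiv (pfN xs i.toNat - pfN xs j.toNat) xs.sum with hd
      by_cases hcond : 1 ≤ d ∨ (d = 0 ∧ i < j)
      · rw [if_pos hcond] at h
        have hc : c = (d, j) := by exact (Option.some_inj.mp h).symm
        have hdiff : pfN xs i.toNat - pfN xs j.toNat = d * xs.sum := by
          have h1 := PySem.Int.floordiv_mul_add_mod (pfN xs i.toNat - pfN xs j.toNat) xs.sum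
          rw [hmod, add_zero] at h1
          rw [hd, h1]
        rw [hc]
        exact ⟨rfl, hj1, hjn, i, hi0, hin, hdiff, hcond⟩
      · rw [if_neg hcond] at h; exact absurd h (by simp)
    · rw [if_neg hmod] at h; exact absurd h (by simp)
  · rw [if_neg hT] at h
    have hT0 : xs.sum = 0 := by omega
    by_cases heq : pfN xs i.toNat = pfN xs j.toNat
    · rw [if_pos heq] at h
      have hc := (Option.some_inj.mp h).symm
      by_cases hij : i < j
      · rw [if_pos hij] at hc
        rw [hc]
        exact ⟨rfl, hj1, hjn, i, hi0, hin, by rw [hT0]; omega, Or.inr ⟨rfl, hij⟩⟩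
      · rw [if_neg hij] at hc
        rw [hc]
        exact ⟨rfl, hj1, hjn, i, hi0, hin, by rw [hT0]; omega, Or.inl (by norm_num)⟩
    · rw [if_neg heq] at h; exact absurd h (by simp)

theorem candAt_complete (xs : List Int) (d j : Int) (h : InS xs d j) :
    ∃ (i : Int) (c : Int × Int), 0 ≤ i ∧ i < xs.length ∧
      candAt xs j i = some c ∧ pvLexLe c (d, j) := by
  obtain ⟨hj1, hjn, i, hi0, hin, hdiff, hcond⟩ := h
  refine ⟨i, ?_⟩
  by_cases hT : xs.sum ≠ 0
  · have hfd : PySem.Int.floordiv (pfN xs i.toNat - pfN xs j.toNat) xs.sum = d :=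
      floordiv_exact _ _ _ hT hdiff
    have hmod : PySem.Int.mod (pfN xs i.toNat - pfN xs j.toNat) xs.sum = 0 :=
      (PySem.Int.mod_eq_zero_iff_dvd _ _).mpr ⟨d, by rw [hdiff]; ring⟩
    refine ⟨(d, j), hi0, hin, ?_, ?_⟩
    · unfold candAt
      rw [if_pos hT, if_pos hmod, hfd, if_pos hcond]
    · unfold pvLexLe; right; exact ⟨rfl, le_refl _⟩
  · have hT0 : xs.sum = 0 := by omega
    have heq : pfN xs i.toNat = pfN xs j.toNat := by rw [hT0] at hdiff; omega
    refine ⟨(if i < j then ((0:Int), j) else (1, j)), hi0, hin, ?_, ?_⟩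
    · unfold candAt
      rw [if_neg hT, if_pos heq]
    · by_cases hij : i < j
      · rw [if_pos hij]
        unfold pvLexLe
        rcases hcond with h1 | ⟨h1, _⟩
        · left; simpa using h1
        · right; rw [h1]; exact ⟨rfl, le_refl _⟩
      · rw [if_neg hij]
        have h1 : 1 ≤ d := by
          rcases hcond with h1 | ⟨_, h2⟩
          · exact h1
          · exact absurd h2 hij
        unfold pvLexLe
        rcases lt_or_eq_of_le h1 with h2 | h2
        · left; simpa using h2
        · right; rw [h2]; exact ⟨rfl, le_refl _⟩

theorem mem_candList (xs : List Int) (c : Int × Int) :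
    c ∈ candList xs ↔ ∃ j i : Int, 1 ≤ j ∧ j ≤ xs.length ∧ 0 ≤ i ∧ i < xs.length ∧
      candAt xs j i = some c := by
  unfold candList
  rw [List.mem_flatMap]
  constructor
  · rintro ⟨j, hj, hc⟩
    rw [PySem.List.mem_pyRange_one] at hj
    rw [List.mem_filterMap] at hc
    obtain ⟨i, hi, hci⟩ := hc
    rw [PySem.List.mem_pyRange_one] at hi
    exact ⟨j, i, hj.1, by omega, hi.1, hi.2, hci⟩
  · rintro ⟨j, i, hj1, hjn, hi0, hin, hci⟩
    refine ⟨j, ?_, ?_⟩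
    · rw [PySem.List.mem_pyRange_one]; omega
    · rw [List.mem_filterMap]; exact ⟨i, by rw [PySem.List.mem_pyRange_one]; omega, hci⟩


theorem T_val' (xs : List Int) :
    PySem.List.pyGetD (pvPrefixes xs) ((xs.length : Int)) 0 = xs.sum := by
  rw [pvPrefixes_pyGetD xs _ (by positivity) (le_refl _)]
  simp [pfN_len]

theorem Pre_gives_S (xs : List Int) (hpre : Pre_repeated_frequency xs) :
    ∃ d j : Int, InS xs d j := by
  obtain ⟨j, hj, i, hi, hcase⟩ := hpre
  rw [Finset.mem_Icc] at hj
  rw [Finset.mem_range] at hi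
  have hij : ((i : Int)).toNat = i := by omega
  have hjj : ((j : Int)).toNat = j := by omega
  rcases hcase with ⟨heq, hor⟩ | ⟨hT, hdvd, hd1⟩
  · rcases hor with hlt | hT0
    · exact ⟨0, (j : Int), by omega, by omega, (i : Int), by omega, by omega,
        by rw [hij, hjj]; unfold pfN; omega, Or.inr ⟨rfl, by omega⟩⟩
    · exact ⟨1, (j : Int), by omega, by omega, (i : Int), by omega, by omega,
        by rw [hij, hjj]; unfold pfN; rw [hT0]; omega, Or.inl (le_refl _)⟩
  · refine ⟨((xs.take i).sum - (xs.take j).sum) / xs.sum, (j : Int), by omega, by omega,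
      (i : Int), by omega, by omega, ?_, Or.inl hd1⟩
    rw [hij, hjj]
    unfold pfN
    rw [Int.ediv_mul_cancel hdvd]

theorem houter (xs : List Int) :
    (PySem.List.pyRange 1 ((xs.length : Int) + 1) 1).foldl
      (fun b j => (PySem.List.pyRange 0 ((xs.length : Int)) 1).foldl
        (fun b i => pvBody (pvPrefixes xs) xs.sum j b i) b) none
    = (candList xs).foldl pvUpd none := by
  rw [PySem.List.foldl_congr_mem _ _
    (fun b j => ((PySem.List.pyRange 0 ((xs.length : Int)) 1).filterMap (candAt xs j)).foldl pvUpd b) _ ?_]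
  · unfold candList
    exact foldl_flat _ _ _
  · intro b j hj
    rw [PySem.List.mem_pyRange_one] at hj
    rw [PySem.List.foldl_congr_mem _ _
      (fun b i => match candAt xs j i with | none => b | some c => pvUpd b c) _ ?_]
    · exact foldl_match_filterMap (candAt xs j) _ b
    · intro b' i hi
      rw [PySem.List.mem_pyRange_one] at hi
      exact body_candAt xs b' i j hi.1 hi.2 hj.1 (by omega)

theorem B_main (xs : List Int) (hS : ∃ d j : Int, InS xs d j) :
    ∃ d0 j0 : Int, InS xs d0 j0 ∧
      (∀ d j : Int, InS xs d j → (d0 < d ∨ (d0 = d ∧ j0 ≤ j))) ∧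
      repeated_frequency_alt xs = pfN xs j0.toNat + d0 * xs.sum := by
  -- the candidate list is nonempty
  obtain ⟨d, j, hIn⟩ := hS
  have hne : candList xs ≠ [] := by
    obtain ⟨i, c, hi0, hin, hci, _⟩ := candAt_complete xs d j hIn
    have : c ∈ candList xs := (mem_candList xs c).mpr ⟨j, i, hIn.1, hIn.2.1, hi0, hin, hci⟩
    intro hnil
    rw [hnil] at this
    exact absurd this (List.not_mem_nil)
  obtain ⟨m, hfold, hmem, hminL⟩ := foldl_pvUpd_none (candList xs) hne
  obtain ⟨j', i', hj1, hjn, hi0, hin, hci⟩ := (mem_candList xs m).mp hmem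
  obtain ⟨hm2, hmInS⟩ := candAt_sound xs i' j' hi0 hin hj1 hjn m hci
  refine ⟨m.1, m.2, by rw [hm2]; exact hmInS, ?_, ?_⟩
  · intro d2 j2 hIn2
    obtain ⟨i2, c2, hi20, hi2n, hci2, hle2⟩ := candAt_complete xs d2 j2 hIn2
    have hc2mem : c2 ∈ candList xs :=
      (mem_candList xs c2).mpr ⟨j2, i2, hIn2.1, hIn2.2.1, hi20, hi2n, hci2⟩
    have h1 : pvLexLe m c2 := hminL c2 hc2mem
    have h2 : pvLexLe m (d2, j2) := pvLexLe_trans _ _ _ h1 hle2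
    unfold pvLexLe at h2
    rcases h2 with h2 | ⟨h2, h2'⟩
    · left; exact h2
    · right; exact ⟨h2, h2'⟩
  · unfold repeated_frequency_alt
    simp only [PySem.List.len_eq, T_val']
    rw [houter, hfold]
    have hj0 : 0 ≤ m.2 := by rw [hm2]; omega
    have hj0n : m.2 ≤ (xs.length : Int) := by rw [hm2]; exact hjn
    obtain ⟨md, mj⟩ := m
    simp only
    rw [pvPrefixes_pyGetD xs mj hj0 hj0n]

theorem seen0_inv (xs : List Int) :
    ∀ x : Int, x ∈ PySem.Set.ofList [0] ↔ ∃ s ≤ 0 * xs.length, vSeq xs s = x := by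
  intro x
  rw [PySem.Set.mem_ofList]
  simp only [List.mem_singleton, Nat.zero_mul, Nat.le_zero]
  constructor
  · intro h; exact ⟨0, rfl, by rw [vSeq_zero, h]⟩
  · rintro ⟨s, hs, heq⟩; rw [hs] at heq; rw [← heq, vSeq_zero]

theorem d0_bound (xs : List Int) (d0 j0 : Int) (hInS : InS xs d0 j0)
    (hmin : ∀ d j : Int, InS xs d j → (d0 < d ∨ (d0 = d ∧ j0 ≤ j))) :
    d0.toNat ≤ 1 + 2 * (xs.map Int.natAbs).sum := by
  obtain ⟨hj1, hjn, i0, hi00, hi0n, hdiff0, hcond0⟩ := hInS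
  by_cases hT : xs.sum = 0
  · have h0 : pfN xs i0.toNat - pfN xs j0.toNat = 0 := by
      rw [hT, mul_zero] at hdiff0; exact hdiff0
    have hIn1 : InS xs 1 j0 :=
      ⟨hj1, hjn, i0, hi00, hi0n, by rw [hT, mul_zero]; exact h0, Or.inl (le_refl 1)⟩
    have := hmin 1 j0 hIn1
    omega
  · have habs : (pfN xs i0.toNat - pfN xs j0.toNat).natAbs = d0.natAbs * xs.sum.natAbs := by
      rw [hdiff0, Int.natAbs_mul]
    have h1 : 1 ≤ xs.sum.natAbs := by omega
    have h2 : d0.natAbs ≤ d0.natAbs * xs.sum.natAbs := Nat.le_mul_of_pos_right _ (by omega)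
    have h3 : (pfN xs i0.toNat - pfN xs j0.toNat).natAbs
        ≤ (pfN xs i0.toNat).natAbs + (pfN xs j0.toNat).natAbs := Int.natAbs_sub_le _ _
    have h4 := pf_bound xs i0.toNat
    have h5 := pf_bound xs j0.toNat
    omega

-- ===== VERDICT (by name: the statement is the Claim_ definition above) =====
theorem repeated_frequency_spec : Claim_equal_repeated_frequency := by
  unfold Claim_equal_repeated_frequency
  intro xs _dom hpre
  unfold Spec_repeated_frequency
  obtain ⟨d0, j0, hInS, hmin, hB⟩ := B_main xs (Pre_gives_S xs hpre)
  have hj1 : 1 ≤ j0 := hInS.1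
  have hjn : j0 ≤ (xs.length : Int) := hInS.2.1
  have hn : 1 ≤ xs.length := by omega
  have hd00 : 0 ≤ d0 := by
    obtain ⟨_, _, i0, _, _, _, hcond0⟩ := hInS
    rcases hcond0 with h | ⟨h, _⟩ <;> omega
  have hcoll : Coll xs (d0.toNat * xs.length + j0.toNat) := collAt xs d0 j0 hInS
  have hminimal : ∀ u, 0 * xs.length < u → u < d0.toNat * xs.length + j0.toNat → ¬ Coll xs u := by
    intro u hu0 hut hcollu
    have hu1 : 1 ≤ u := by omega
    obtain ⟨d'', dt, jt, hteq, hjt1, hjtn, hInS'', hdle⟩ := collDecomp xs u hu1 hn hcollu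
    have hcmp := hmin d'' (jt : Int) hInS''
    rcases hcmp with hlt | ⟨heq, hle⟩
    · have hdt : d0.toNat < dt := by omega
      have hmul : (d0.toNat + 1) * xs.length ≤ dt * xs.length :=
        Nat.mul_le_mul_right _ (by omega)
      have hexp : (d0.toNat + 1) * xs.length = d0.toNat * xs.length + xs.length := by
        rw [Nat.add_mul]; omega
      omega
    · have hdt : d0.toNat ≤ dt := by omega
      by_cases hdt2 : d0.toNat = dt
      · rw [hdt2] at hut
        omega
      · have hmul : (d0.toNat + 1) * xs.length ≤ dt * xs.length :=
          Nat.mul_le_mul_right _ (by omega)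
        have hexp : (d0.toNat + 1) * xs.length = d0.toNat * xs.length + xs.length := by
          rw [Nat.add_mul]; omega
        omega
  have hfuel : d0.toNat * xs.length + j0.toNat
      ≤ 0 * xs.length + (2 + 2 * (xs.map Int.natAbs).sum) * xs.length := by
    have hd := d0_bound xs d0 j0 hInS hmin
    have hmul : (d0.toNat + 1) * xs.length
        ≤ (2 + 2 * (xs.map Int.natAbs).sum) * xs.length :=
      Nat.mul_le_mul_right _ (by omega)
    have hexp : (d0.toNat + 1) * xs.length = d0.toNat * xs.length + xs.length := by
      rw [Nat.add_mul]; omega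
    omega
  have hA := pvWhileA_spec xs hn (2 + 2 * (xs.map Int.natAbs).sum) 0 (PySem.Set.ofList [0])
    (d0.toNat * xs.length + j0.toNat) (seen0_inv xs) (by omega) hcoll hminimal hfuel
  rw [Nat.zero_mul, vSeq_zero] at hA
  unfold repeated_frequency
  rw [hA, vSeq_decomp xs d0.toNat j0.toNat (by omega) (by omega), hB,
    Int.toNat_of_nonneg hd00]
  ring
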